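-- pv_equiv track=rewrite | github.com/hhampson/cs230_where_da_droughts_at | data/precipitation.py | get_area_coords
-- ===== SOURCE A (Python) =====
-- def get_area_coords(coordinate_list, lims):
--     """
--     Given an array of coordinates and coordinate limits specified, return the
--     index corresponding to those limits and the clipped array.
--     """
--     idx = []
--     for lim in lims:
--         minimum = float("inf")
--         for i in range(len(coordinate_list)):
--             if abs(lim - coordinate_list[i]) < minimum:
--                 final_value = i
--                 minimum = abs(lim - coordinate_list[i])
--         idx.append(final_value)
--     area_coords = coordinate_list[idx[0]: idx[1]]
--     return area_coords, idx
-- ===== SOURCE B (Python) =====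
-- def get_area_coords(coordinate_list, lims):
--     """
--     Same result as A, computed in a single pass over coordinate_list:
--     instead of rescanning the whole coordinate array once per limit, we
--     sweep the coordinates once and maintain, for every limit, the best
--     (distance, index) pair seen so far (strict improvement keeps the
--     lowest index, exactly like A's strict '<' test).
--     """
--     best = [None] * len(lims)  # per limit: (distance, index) or None
--     for i, c in enumerate(coordinate_list):
--         best = [
--             (abs(lim - c), i) if b is None or abs(lim - c) < b[0] else b
--             for b, lim in zip(best, lims)
--         ]
--     idx = [b[1] for b in best]
--     return coordinate_list[idx[0]: idx[1]], idx
-- ===== Notes on version B (the rewrite author's own statement) =====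
-- stated objective: alternative
-- what changed: B replaces A's per-limit rescan of the whole coordinate array by a single sweep over the coordinates that maintains the best (distance, index) pair for every limit simultaneously (transposed loop order, different state).
import Mathlib
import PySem

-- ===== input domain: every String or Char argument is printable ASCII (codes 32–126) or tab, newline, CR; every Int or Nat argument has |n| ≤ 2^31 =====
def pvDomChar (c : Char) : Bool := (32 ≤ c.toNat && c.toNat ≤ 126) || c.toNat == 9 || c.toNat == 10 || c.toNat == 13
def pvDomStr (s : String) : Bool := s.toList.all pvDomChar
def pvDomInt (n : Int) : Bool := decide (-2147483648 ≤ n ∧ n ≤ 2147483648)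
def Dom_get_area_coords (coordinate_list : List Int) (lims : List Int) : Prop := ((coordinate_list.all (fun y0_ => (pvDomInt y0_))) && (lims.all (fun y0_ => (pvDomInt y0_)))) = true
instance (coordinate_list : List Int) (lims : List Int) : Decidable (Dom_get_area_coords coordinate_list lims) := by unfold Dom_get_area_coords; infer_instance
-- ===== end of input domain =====

-- B computes the same nearest-index table in one sweep over the coordinates
-- (per-limit best pairs maintained simultaneously) instead of A's per-limit
-- rescan; objective: alternative traversal, same exact result.

-- ===== PORT A =====
def get_area_coords (coordinate_list : List Int) (lims : List Int) : List Int × List Int :=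
  let idx : List Int := lims.foldl (fun idx lim =>
    -- inner loop: minimum starts at float('inf') (modelled as none);
    -- final_value starts undefined (unreachable default 0 under Pre_, where
    -- coordinate_list is nonempty so the first iteration always sets it)
    let st := (PySem.List.pyRange 0 (coordinate_list.length : Int) 1).foldl
      (fun (st : Option Int × Int) i =>
        let d := |lim - PySem.List.pyGetD coordinate_list i 0|
        match st.1 with
        | none => (some d, i)
        | some m => if d < m then (some d, i) else st)
      (none, 0)
    idx ++ [st.2]) []
  (PySem.List.slice coordinate_list (some (PySem.List.pyGetD idx 0 0)) (some (PySem.List.pyGetD idx 1 0)), idx)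

-- ===== PORT B =====
def get_area_coords_alt (coordinate_list : List Int) (lims : List Int) : List Int × List Int :=
  let best0 : List (Option (Int × Int)) := lims.map (fun _ => none)
  let best := (PySem.List.enumerate coordinate_list 0).foldl
    (fun best (p : Int × Int) =>
      (best.zip lims).map (fun (q : Option (Int × Int) × Int) =>
        match q.1 with
        | none => some (|q.2 - p.2|, p.1)
        | some b => if |q.2 - p.2| < b.1 then some (|q.2 - p.2|, p.1) else some b))
    best0
  let idx := best.map (fun b => (b.getD (0, 0)).2)
  (PySem.List.slice coordinate_list (some (PySem.List.pyGetD idx 0 0)) (some (PySem.List.pyGetD idx 1 0)), idx)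

-- ===== PRECONDITION & SPEC =====
-- Pre_ excludes exactly the inputs where the Python A raises: an empty
-- coordinate_list (NameError: final_value never assigned) and fewer than two
-- limits (IndexError on idx[1]).
def Pre_get_area_coords (coordinate_list : List Int) (lims : List Int) : Prop :=
  coordinate_list ≠ [] ∧ 2 ≤ lims.length
instance (coordinate_list : List Int) (lims : List Int) : Decidable (Pre_get_area_coords coordinate_list lims) := by unfold Pre_get_area_coords; infer_instance
def pvWitness_get_area_coords : List Int × List Int := ([1, 3, 7], [2, 8])

def Spec_get_area_coords (coordinate_list : List Int) (lims : List Int) (out : List Int × List Int) : Prop := out = get_area_coords_alt coordinate_list lims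
instance (coordinate_list : List Int) (lims : List Int) (out : List Int × List Int) : Decidable (Spec_get_area_coords coordinate_list lims out) := by unfold Spec_get_area_coords; infer_instance

-- ===== CLAIM (what is proved, stated in full; the proofs are below) =====
def Claim_equal_get_area_coords : Prop := ∀ (coordinate_list : List Int) (lims : List Int), Dom_get_area_coords coordinate_list lims → Pre_get_area_coords coordinate_list lims → Spec_get_area_coords coordinate_list lims (get_area_coords coordinate_list lims)

-- ===== LEMMAS AND PROOFS =====

-- A's inner-loop step, per limit, on (minimum?, final_value) and one (index, value) pair
def stepA (lim : Int) (st : Option Int × Int) (p : Int × Int) : Option Int × Int :=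
  match st.1 with
  | none => (some (|lim - p.2|), p.1)
  | some m => if |lim - p.2| < m then (some (|lim - p.2|), p.1) else st

-- B's per-limit step on the optional (distance, index) pair
def stepB (lim : Int) (b : Option (Int × Int)) (p : Int × Int) : Option (Int × Int) :=
  match b with
  | none => some (|lim - p.2|, p.1)
  | some b => if |lim - p.2| < b.1 then some (|lim - p.2|, p.1) else some b

def convAB (st : Option Int × Int) : Option (Int × Int) := st.1.map (fun d => (d, st.2))

theorem stepAB (lim : Int) (st : Option Int × Int) (p : Int × Int) :
    stepB lim (convAB st) p = convAB (stepA lim st p) := by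
  obtain ⟨m, fv⟩ := st
  cases m with
  | none => rfl
  | some m =>
    show stepB lim (some (m, fv)) p
        = convAB (if |lim - p.2| < m then (some (|lim - p.2|), p.1) else (some m, fv))
    by_cases h : |lim - p.2| < m <;> simp [stepB, convAB, h]

theorem foldAB (lim : Int) (e : List (Int × Int)) (st : Option Int × Int) :
    e.foldl (stepB lim) (convAB st) = convAB (e.foldl (stepA lim) st) := by
  induction e generalizing st with
  | nil => rfl
  | cons p e ih => simp only [List.foldl_cons, stepAB]; exact ih _

theorem stepA_isSome (lim : Int) (st : Option Int × Int) (p : Int × Int) :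
    (stepA lim st p).1.isSome := by
  obtain ⟨m, fv⟩ := st
  cases m with
  | none => simp [stepA]
  | some m => simp only [stepA]; split_ifs <;> simp

theorem foldA_isSome (lim : Int) (e : List (Int × Int)) (st : Option Int × Int)
    (h : st.1.isSome) : ((e.foldl (stepA lim) st).1).isSome := by
  induction e generalizing st with
  | nil => exact h
  | cons p e ih => exact ih _ (stepA_isSome lim st p)

-- per-limit agreement of the two folds (over a nonempty coordinate pairing)
theorem perLim (lim : Int) (e : List (Int × Int)) (he : e ≠ []) :
    ((e.foldl (stepB lim) none).getD (0, 0)).2 = (e.foldl (stepA lim) (none, 0)).2 := by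
  have h : (none : Option (Int × Int)) = convAB (none, 0) := rfl
  rw [h, foldAB]
  cases e with
  | nil => exact absurd rfl he
  | cons p e =>
    have hs := foldA_isSome lim e (stepA lim (none, 0) p) (stepA_isSome lim (none, 0) p)
    simp only [List.foldl_cons] at *
    obtain ⟨d, hd⟩ := Option.isSome_iff_exists.mp hs
    set r := e.foldl (stepA lim) (stepA lim (none, 0) p)
    obtain ⟨r1, r2⟩ := r
    simp_all [convAB]

-- one sweep step of B = per-limit map (zip of a map, mapped)
theorem zip_map_map {α σ τ : Type} (l : List α) (g : α → σ) (h : σ × α → τ) :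
    ((l.map g).zip l).map h = l.map (fun x => h (g x, x)) := by
  induction l with
  | nil => rfl
  | cons x l ih => simp [ih]

theorem foldB_map (lims : List Int) (e : List (Int × Int)) (g : Int → Option (Int × Int)) :
    e.foldl (fun best (p : Int × Int) =>
        (best.zip lims).map (fun (q : Option (Int × Int) × Int) =>
          match q.1 with
          | none => some (|q.2 - p.2|, p.1)
          | some b => if |q.2 - p.2| < b.1 then some (|q.2 - p.2|, p.1) else some b))
      (lims.map g)
    = lims.map (fun lim => e.foldl (stepB lim) (g lim)) := by
  induction e generalizing g with
  | nil => rfl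
  | cons p e ih =>
    simp only [List.foldl_cons]
    rw [zip_map_map]
    exact ih _

-- ===== VERDICT (by name: the statement is the Claim_ definition above) =====
theorem get_area_coords_spec : Claim_equal_get_area_coords := by
  intro cl lims _ hpre
  obtain ⟨hcl, _⟩ := hpre
  unfold Spec_get_area_coords get_area_coords get_area_coords_alt
  have henum : PySem.List.enumerate cl 0 ≠ [] := by
    cases cl with
    | nil => exact absurd rfl hcl
    | cons x t => simp [PySem.List.enumerate_cons]
  -- identify the two idx lists
  have hidx :
      (lims.foldl (fun idx lim =>
        idx ++ [((PySem.List.pyRange 0 (cl.length : Int) 1).foldl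
          (fun (st : Option Int × Int) i =>
            let d := |lim - PySem.List.pyGetD cl i 0|
            match st.1 with
            | none => (some d, i)
            | some m => if d < m then (some d, i) else st)
          (none, 0)).2]) [])
      = ((PySem.List.enumerate cl 0).foldl
          (fun best (p : Int × Int) =>
            (best.zip lims).map (fun (q : Option (Int × Int) × Int) =>
              match q.1 with
              | none => some (|q.2 - p.2|, p.1)
              | some b => if |q.2 - p.2| < b.1 then some (|q.2 - p.2|, p.1) else some b))
          (lims.map (fun _ => none))).map (fun b => (b.getD (0, 0)).2) := by
    rw [foldB_map lims _ (fun _ => none), PySem.List.foldl_append_singleton_eq_map,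
      List.map_map]
    apply List.map_congr_left
    intro lim _
    have hA : (PySem.List.pyRange 0 (cl.length : Int) 1).foldl
        (fun (st : Option Int × Int) i =>
          let d := |lim - PySem.List.pyGetD cl i 0|
          match st.1 with
          | none => (some d, i)
          | some m => if d < m then (some d, i) else st)
        (none, 0)
        = (PySem.List.enumerate cl 0).foldl (stepA lim) (none, 0) := by
      rw [PySem.List.enumerate_eq_map_pyRange cl 0, List.foldl_map]
      rfl
    simp only [Function.comp, hA]
    exact (perLim lim _ henum).symm
  simp only [hidx]
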